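-- pv_equiv track=rewrite | github.com/Chocochip101/Programmers | 교점에 별 만들기.py | solution
-- ===== SOURCE A (Python) =====
-- from itertools import combinations
--
-- def solution(line):
--     min_x = float('inf')
--     min_y = float('inf')
--     max_x = -float('inf')
--     max_y = -float('inf')
--     star_coord = set()
--     for line1, line2 in combinations(line, 2):
--         A, B, E = line1
--         C, D, F = line2
--         if A * D == B * C:
--             continue
--         if (B * F - E * D) % (A * D - B * C) == 0 and (E * C - A * F) % (A * D - B * C) == 0:
--             x = (B * F - E * D) // (A * D - B * C)
--             y = (E * C - A * F) // (A * D - B * C)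
--             min_x = min(min_x, x)
--             max_x = max(max_x, x)
--             min_y = min(min_y, y)
--             max_y = max(max_y, y)
--
--             star_coord.add((x, y))
--
--     answer = []
--     for y in range(max_y, min_y - 1, -1):
--         s = []
--         for x in range(min_x, max_x + 1):
--             if (x, y) in star_coord:
--                 s.append('*')
--             else:
--                 s.append(".")
--         answer.append("".join(s))
--     return answer
-- ===== SOURCE B (Python) =====
-- from itertools import combinations
--
-- def solution(line):
--     pts = set()
--     for (A, B, E), (C, D, F) in combinations(line, 2):
--         det = A * D - B * C
--         if det == 0:
--             continue
--         x, rx = divmod(B * F - E * D, det)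
--         y, ry = divmod(E * C - A * F, det)
--         if rx == 0 and ry == 0:
--             pts.add((x, y))
--     min_x = min(p[0] for p in pts)
--     max_x = max(p[0] for p in pts)
--     min_y = min(p[1] for p in pts)
--     max_y = max(p[1] for p in pts)
--     rows = {}
--     for x, y in pts:
--         rows.setdefault(y, []).append(x)
--     answer = []
--     for y in range(max_y, min_y - 1, -1):
--         row = ''
--         prev = min_x
--         for x in sorted(rows.get(y, ())):
--             row += '.' * (x - prev) + '*'
--             prev = x + 1
--         answer.append(row + '.' * (max_x + 1 - prev))
--     return answer
-- ===== Notes on version B (the rewrite author's own statement) =====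
-- stated objective: alternative
-- what changed: A tracks bounds inside the intersection loop and renders the grid cell-by-cell, testing each (x,y) against the star set; B collects the points, takes bounds afterwards, groups the stars by row in a dict, and builds each row string by run-length gap filling over that row's sorted star columns, so no per-cell membership test and no grid exists.
import Mathlib
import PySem

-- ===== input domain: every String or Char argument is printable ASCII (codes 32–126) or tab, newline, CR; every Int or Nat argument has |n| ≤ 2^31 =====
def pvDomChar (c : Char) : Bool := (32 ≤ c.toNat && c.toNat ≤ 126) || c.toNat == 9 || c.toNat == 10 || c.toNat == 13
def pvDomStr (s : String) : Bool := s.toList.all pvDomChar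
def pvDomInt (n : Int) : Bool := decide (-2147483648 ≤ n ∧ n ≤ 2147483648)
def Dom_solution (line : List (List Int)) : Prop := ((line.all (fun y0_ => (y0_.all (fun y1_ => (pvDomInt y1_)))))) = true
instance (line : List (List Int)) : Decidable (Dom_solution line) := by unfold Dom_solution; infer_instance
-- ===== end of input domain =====

-- B drops A's in-loop bound tracking and cell-by-cell membership rendering: it collects
-- the points, takes bounds afterwards, groups stars by row in a dict and emits each row
-- by run-length gap filling over that row's sorted star columns (objective: alternative).

-- ===== PORT A =====

-- min(min_x, x) where min_x may still be float('inf') (none)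
def pvOmin (o : Option Int) (x : Int) : Option Int :=
  match o with
  | none => some x
  | some m => some (min m x)

def pvOmax (o : Option Int) (x : Int) : Option Int :=
  match o with
  | none => some x
  | some m => some (max m x)

-- the body of A's 'for line1, line2 in combinations(line, 2)' loop; the tuple
-- unpackings 'A, B, E = line1' etc. are ported with getD (Pre_ guarantees length 3,
-- Python raises ValueError otherwise)
def pvStepA (st : Option Int × Option Int × Option Int × Option Int × PySem.Set (Int × Int))
    (c : List (List Int)) :
    Option Int × Option Int × Option Int × Option Int × PySem.Set (Int × Int) :=
  let l1 := c.getD 0 []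
  let l2 := c.getD 1 []
  let A := l1.getD 0 0; let B := l1.getD 1 0; let E := l1.getD 2 0
  let C := l2.getD 0 0; let D := l2.getD 1 0; let F := l2.getD 2 0
  if A * D = B * C then st
  else if PySem.Int.mod (B * F - E * D) (A * D - B * C) = 0 ∧
          PySem.Int.mod (E * C - A * F) (A * D - B * C) = 0 then
    let x := PySem.Int.floordiv (B * F - E * D) (A * D - B * C)
    let y := PySem.Int.floordiv (E * C - A * F) (A * D - B * C)
    (pvOmin st.1 x, pvOmax st.2.1 x, pvOmin st.2.2.1 y, pvOmax st.2.2.2.1 y,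
      PySem.Set.add st.2.2.2.2 (x, y))
  else st

def solution (line : List (List Int)) : List String :=
  let st := (PySem.List.combinations line 2).foldl pvStepA
      (none, none, none, none, PySem.Set.empty)
  match st.1, st.2.1, st.2.2.1, st.2.2.2.1 with
  | some min_x, some max_x, some min_y, some max_y =>
    (PySem.List.pyRange max_y (min_y - 1) (-1)).foldl (fun answer y =>
      answer ++ [String.ofList ((PySem.List.pyRange min_x (max_x + 1) 1).foldl (fun s x =>
        s ++ [if (x, y) ∈ st.2.2.2.2 then '*' else '.']) [])]) []
  | _, _, _, _ => []  -- no intersection: Python's range(max_y, …) on float inf raises TypeError; excluded by Pre_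

-- ===== PORT B =====

-- the body of B's intersection loop: x, rx = divmod(...); det ≠ 0 on this branch, so
-- divmod? is some and the getD default is never used
def pvStepB (pts : PySem.Set (Int × Int)) (c : List (List Int)) : PySem.Set (Int × Int) :=
  let l1 := c.getD 0 []
  let l2 := c.getD 1 []
  let A := l1.getD 0 0; let B := l1.getD 1 0; let E := l1.getD 2 0
  let C := l2.getD 0 0; let D := l2.getD 1 0; let F := l2.getD 2 0
  let det := A * D - B * C
  if det = 0 then pts
  else
    let xd := (PySem.Int.divmod? (B * F - E * D) det).getD (0, 0)
    let yd := (PySem.Int.divmod? (E * C - A * F) det).getD (0, 0)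
    if xd.2 = 0 ∧ yd.2 = 0 then PySem.Set.add pts (xd.1, yd.1) else pts

def solution_alt (line : List (List Int)) : List String :=
  let pts := (PySem.List.combinations line 2).foldl pvStepB PySem.Set.empty
  -- empty pts: Python's min() raises ValueError; excluded by Pre_
  match PySem.List.min? (pts.map Prod.fst) (fun v => v) with
  | none => []
  | some min_x =>
    match PySem.List.max? (pts.map Prod.fst) (fun v => v) with
    | none => []
    | some max_x =>
      match PySem.List.min? (pts.map Prod.snd) (fun v => v) with
      | none => []
      | some min_y =>
        match PySem.List.max? (pts.map Prod.snd) (fun v => v) with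
        | none => []
        | some max_y =>
          -- rows.setdefault(y, []).append(x) over the point set; only looked up afterwards
          let rows : PySem.Dict Int (List Int) :=
            pts.foldl (fun d p => d.modify p.2 [] (· ++ [p.1])) PySem.Dict.empty
          -- row string built by '+='; exact as a List Char accumulation
          (PySem.List.pyRange max_y (min_y - 1) (-1)).foldl (fun answer y =>
            let rc := (PySem.List.sorted (rows.getD y []) (fun v => v) false).foldl
                (fun st x => (st.1 ++ PySem.List.pyRepeat ['.'] (x - st.2) ++ ['*'], x + 1))
                ([], min_x)
            answer ++ [String.ofList (rc.1 ++ PySem.List.pyRepeat ['.'] (max_x + 1 - rc.2))]) []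

-- ===== PRECONDITION & SPEC =====

-- Pre_ excludes exactly the inputs where the Python A raises: a row that is not a
-- triple (ValueError on unpacking), and inputs with no integer intersection point
-- at all (the bounds stay float('inf') and range() raises TypeError).
def Pre_solution (line : List (List Int)) : Prop :=
  (∀ l ∈ line, l.length = 3) ∧
  ∃ j < line.length, ∃ i < j,
    (line.getD i []).getD 0 0 * (line.getD j []).getD 1 0
        ≠ (line.getD i []).getD 1 0 * (line.getD j []).getD 0 0 ∧
    ((line.getD i []).getD 0 0 * (line.getD j []).getD 1 0
        - (line.getD i []).getD 1 0 * (line.getD j []).getD 0 0)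
      ∣ ((line.getD i []).getD 1 0 * (line.getD j []).getD 2 0
        - (line.getD i []).getD 2 0 * (line.getD j []).getD 1 0) ∧
    ((line.getD i []).getD 0 0 * (line.getD j []).getD 1 0
        - (line.getD i []).getD 1 0 * (line.getD j []).getD 0 0)
      ∣ ((line.getD i []).getD 2 0 * (line.getD j []).getD 0 0
        - (line.getD i []).getD 0 0 * (line.getD j []).getD 2 0)

instance (line : List (List Int)) : Decidable (Pre_solution line) := by
  unfold Pre_solution; infer_instance

def pvWitness_solution : List (List Int) := [[1, 0, 0], [0, 1, 0]]

def Spec_solution (line : List (List Int)) (out : List String) : Prop := out = solution_alt line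
instance (line : List (List Int)) (out : List String) : Decidable (Spec_solution line out) := by
  unfold Spec_solution; infer_instance

-- ===== CLAIM (what is proved, stated in full; the proofs are below) =====
def Claim_equal_solution : Prop := ∀ (line : List (List Int)), Dom_solution line → Pre_solution line → Spec_solution line (solution line)

-- ===== LEMMAS AND PROOFS =====

-- the point a pair of rows contributes, if any (proof-only abstraction of both loop bodies)
def pvEmit (c : List (List Int)) : Option (Int × Int) :=
  let l1 := c.getD 0 []
  let l2 := c.getD 1 []
  let A := l1.getD 0 0; let B := l1.getD 1 0; let E := l1.getD 2 0
  let C := l2.getD 0 0; let D := l2.getD 1 0; let F := l2.getD 2 0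
  let det := A * D - B * C
  if A * D = B * C then none
  else if PySem.Int.mod (B * F - E * D) det = 0 ∧ PySem.Int.mod (E * C - A * F) det = 0 then
    some (PySem.Int.floordiv (B * F - E * D) det, PySem.Int.floordiv (E * C - A * F) det)
  else none

lemma pvStepB_eq_emit (pts : PySem.Set (Int × Int)) (c : List (List Int)) :
    pvStepB pts c = match pvEmit c with
      | none => pts
      | some p => PySem.Set.add pts p := by
  simp only [pvStepB, pvEmit, PySem.Int.divmod?, sub_eq_zero]
  split_ifs <;> simp_all [PySem.Int.mod, PySem.Int.floordiv]

lemma pvStepA_eq_emit (st : Option Int × Option Int × Option Int × Option Int × PySem.Set (Int × Int))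
    (c : List (List Int)) :
    pvStepA st c = match pvEmit c with
      | none => st
      | some p => (pvOmin st.1 p.1, pvOmax st.2.1 p.1, pvOmin st.2.2.1 p.2, pvOmax st.2.2.2.1 p.2,
          PySem.Set.add st.2.2.2.2 p) := by
  simp only [pvStepA, pvEmit]
  split_ifs <;> simp_all

-- the B-side point-collecting fold
def pvPts (line : List (List Int)) : PySem.Set (Int × Int) :=
  (PySem.List.combinations line 2).foldl pvStepB PySem.Set.empty

lemma min?_append_singleton (l : List Int) (x : Int) :
    PySem.List.min? (l ++ [x]) (fun v => v) = pvOmin (PySem.List.min? l (fun v => v)) x := by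
  cases l with
  | nil => simp [PySem.List.min?, pvOmin]
  | cons h t =>
    rw [List.cons_append, PySem.List.min?_id_cons, PySem.List.min?_id_cons]
    simp [pvOmin, List.foldl_append]

lemma max?_append_singleton (l : List Int) (x : Int) :
    PySem.List.max? (l ++ [x]) (fun v => v) = pvOmax (PySem.List.max? l (fun v => v)) x := by
  cases l with
  | nil => simp [PySem.List.max?, pvOmax]
  | cons h t =>
    rw [List.cons_append, PySem.List.max?_id_cons, PySem.List.max?_id_cons]
    simp [pvOmax, List.foldl_append]

-- adding a point updates min?/max? like A's running bounds do
lemma omin_add (proj : Int × Int → Int) (o : Option Int) (s : PySem.Set (Int × Int))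
    (p : Int × Int) (h : o = PySem.List.min? (s.map proj) (fun v => v)) :
    pvOmin o (proj p) = PySem.List.min? ((PySem.Set.add s p).map proj) (fun v => v) := by
  by_cases hm : p ∈ s
  · rw [PySem.Set.add_of_mem hm, ← h]
    subst h
    cases hmm : PySem.List.min? (s.map proj) (fun v => v) with
    | none =>
      rw [PySem.List.min?_eq_none_iff] at hmm
      simp at hmm; simp [hmm] at hm
    | some m =>
      have hle := PySem.List.min?_isMin hmm (proj p) (List.mem_map_of_mem hm)
      simp [pvOmin, min_eq_left hle]
  · rw [PySem.Set.add_of_not_mem hm, List.map_append, List.map_singleton,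
      min?_append_singleton, h]

lemma omax_add (proj : Int × Int → Int) (o : Option Int) (s : PySem.Set (Int × Int))
    (p : Int × Int) (h : o = PySem.List.max? (s.map proj) (fun v => v)) :
    pvOmax o (proj p) = PySem.List.max? ((PySem.Set.add s p).map proj) (fun v => v) := by
  by_cases hm : p ∈ s
  · rw [PySem.Set.add_of_mem hm, ← h]
    subst h
    cases hmm : PySem.List.max? (s.map proj) (fun v => v) with
    | none =>
      rw [PySem.List.max?_eq_none_iff] at hmm
      simp at hmm; simp [hmm] at hm
    | some m =>
      have hle := PySem.List.max?_isMax hmm (proj p) (List.mem_map_of_mem hm)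
      simp [pvOmax, max_eq_left hle]
  · rw [PySem.Set.add_of_not_mem hm, List.map_append, List.map_singleton,
      max?_append_singleton, h]

-- A's five-accumulator fold keeps its four bounds equal to min?/max? over B's point set
lemma foldA_general :
    ∀ (cs : List (List (List Int))) (o1 o2 o3 o4 : Option Int) (s : PySem.Set (Int × Int)),
    o1 = PySem.List.min? (s.map Prod.fst) (fun v => v) →
    o2 = PySem.List.max? (s.map Prod.fst) (fun v => v) →
    o3 = PySem.List.min? (s.map Prod.snd) (fun v => v) →
    o4 = PySem.List.max? (s.map Prod.snd) (fun v => v) →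
    cs.foldl pvStepA (o1, o2, o3, o4, s)
      = (PySem.List.min? ((cs.foldl pvStepB s).map Prod.fst) (fun v => v),
         PySem.List.max? ((cs.foldl pvStepB s).map Prod.fst) (fun v => v),
         PySem.List.min? ((cs.foldl pvStepB s).map Prod.snd) (fun v => v),
         PySem.List.max? ((cs.foldl pvStepB s).map Prod.snd) (fun v => v),
         cs.foldl pvStepB s) := by
  intro cs
  induction cs with
  | nil =>
    intro o1 o2 o3 o4 s h1 h2 h3 h4
    simp only [List.foldl_nil]
    rw [h1, h2, h3, h4]
  | cons c cs ih =>
    intro o1 o2 o3 o4 s h1 h2 h3 h4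
    simp only [List.foldl_cons, pvStepA_eq_emit, pvStepB_eq_emit]
    cases he : pvEmit c with
    | none => exact ih o1 o2 o3 o4 s h1 h2 h3 h4
    | some p =>
      exact ih _ _ _ _ _ (omin_add Prod.fst o1 s p h1) (omax_add Prod.fst o2 s p h2)
        (omin_add Prod.snd o3 s p h3) (omax_add Prod.snd o4 s p h4)

lemma foldA_components (line : List (List Int)) :
    (PySem.List.combinations line 2).foldl pvStepA (none, none, none, none, PySem.Set.empty)
      = (PySem.List.min? ((pvPts line).map Prod.fst) (fun v => v),
         PySem.List.max? ((pvPts line).map Prod.fst) (fun v => v),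
         PySem.List.min? ((pvPts line).map Prod.snd) (fun v => v),
         PySem.List.max? ((pvPts line).map Prod.snd) (fun v => v),
         pvPts line) :=
  foldA_general _ none none none none PySem.Set.empty rfl rfl rfl rfl

-- membership in the collected set
lemma mem_foldl_pvStepB (p : Int × Int) :
    ∀ (cs : List (List (List Int))) (s : PySem.Set (Int × Int)),
    p ∈ cs.foldl pvStepB s ↔ p ∈ s ∨ ∃ c ∈ cs, pvEmit c = some p := by
  intro cs
  induction cs with
  | nil => intro s; simp
  | cons c cs ih =>
    intro s
    simp only [List.foldl_cons, pvStepB_eq_emit, ih, List.mem_cons]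
    cases he : pvEmit c with
    | none =>
      constructor
      · rintro (h | ⟨d, hd, hde⟩)
        · exact Or.inl h
        · exact Or.inr ⟨d, Or.inr hd, hde⟩
      · rintro (h | ⟨d, rfl | hd, hde⟩)
        · exact Or.inl h
        · rw [he] at hde; cases hde
        · exact Or.inr ⟨d, hd, hde⟩
    | some q =>
      rw [PySem.Set.mem_add]
      constructor
      · rintro ((h | rfl) | ⟨d, hd, hde⟩)
        · exact Or.inl h
        · exact Or.inr ⟨c, Or.inl rfl, he⟩
        · exact Or.inr ⟨d, Or.inr hd, hde⟩
      · rintro (h | ⟨d, rfl | hd, hde⟩)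
        · exact Or.inl (Or.inl h)
        · rw [he] at hde; cases hde; exact Or.inl (Or.inr rfl)
        · exact Or.inr ⟨d, hd, hde⟩

lemma nodup_foldl_pvStepB :
    ∀ (cs : List (List (List Int))) (s : PySem.Set (Int × Int)),
    s.Nodup → (cs.foldl pvStepB s).Nodup := by
  intro cs
  induction cs with
  | nil => intro s h; exact h
  | cons c cs ih =>
    intro s h
    cases he : pvEmit c with
    | none => rw [List.foldl_cons, pvStepB_eq_emit, he]; exact ih s h
    | some p => rw [List.foldl_cons, pvStepB_eq_emit, he]; exact ih (PySem.Set.add s p) (PySem.Set.nodup_add s p h)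

-- [l[i], l[j]] is one of the 2-combinations of l, for i < j
lemma pair_mem_combinations :
    ∀ (l : List (List Int)) (i j : Nat), i < j → j < l.length →
    [l.getD i [], l.getD j []] ∈ PySem.List.combinations l 2 := by
  intro l
  induction l with
  | nil => intro i j hij hj; simp at hj
  | cons x xs ih =>
    intro i j hij hj
    rw [PySem.List.combinations_cons_succ, List.mem_append]
    cases i with
    | zero =>
      left
      rw [PySem.List.combinations_one, List.mem_map]
      refine ⟨[xs.getD (j - 1) []], List.mem_map.mpr ⟨xs.getD (j - 1) [], ?_, rfl⟩, ?_⟩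
      · have hlt : j - 1 < xs.length := by simp at hj; omega
        rw [List.getD_eq_getElem _ _ hlt]
        exact List.getElem_mem hlt
      · obtain ⟨j', rfl⟩ : ∃ j', j = j' + 1 := ⟨j - 1, by omega⟩
        simp
    | succ i' =>
      right
      obtain ⟨j', rfl⟩ : ∃ j', j = j' + 1 := ⟨j - 1, by omega⟩
      simp only [List.getD_cons_succ]
      exact ih i' j' (by omega) (by simp at hj; omega)

lemma pvPts_ne_nil (line : List (List Int)) (h : Pre_solution line) :
    pvPts line ≠ [] := by
  obtain ⟨-, j, hj, i, hij, hc⟩ := h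
  have hmem := pair_mem_combinations line i j hij hj
  have hemit : ∃ p, pvEmit [line.getD i [], line.getD j []] = some p := by
    simp only [pvEmit] at hc ⊢
    obtain ⟨hne, hd1, hd2⟩ := hc
    rw [if_neg (by simpa using hne), if_pos]
    · exact ⟨_, rfl⟩
    · constructor <;> rw [PySem.Int.mod_eq_zero_iff_dvd] <;> assumption
  obtain ⟨p, hp⟩ := hemit
  have : p ∈ pvPts line := by
    rw [pvPts, mem_foldl_pvStepB]
    exact Or.inr ⟨_, hmem, hp⟩
  intro hnil
  rw [hnil] at this
  simp at this

-- B's grouping dict, characterized: row y holds exactly the x's with (x,y) ∈ pts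
lemma getD_rows (pts : PySem.Set (Int × Int)) (y : Int) :
    (pts.foldl (fun d p => d.modify p.2 [] (· ++ [p.1])) PySem.Dict.empty).getD y []
      = ((pts.map Prod.swap).filter (fun q => q.1 == y)).map (·.2) := by
  have hfold : pts.foldl (fun d p => d.modify p.2 [] (· ++ [p.1])) PySem.Dict.empty
      = (pts.map Prod.swap).foldl (fun d q => d.modify q.1 [] (· ++ [q.2])) PySem.Dict.empty := by
    rw [List.foldl_map]
    rfl
  rw [hfold, PySem.Dict.getD_foldl_modify_append]
  simp [PySem.Dict.getD, PySem.Dict.empty, PySem.Dict.get?]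

-- the run-length row builder equals the per-cell membership row, for strictly
-- increasing xs inside the bounds
lemma rowFold (mx : Int) :
    ∀ (xs : List Int) (acc : List Char) (prev : Int),
    xs.Pairwise (· < ·) →
    (∀ x ∈ xs, prev ≤ x) → (∀ x ∈ xs, x ≤ mx) →
    (xs.foldl (fun st x => (st.1 ++ PySem.List.pyRepeat ['.'] (x - st.2) ++ ['*'], x + 1))
        (acc, prev)).1
      ++ PySem.List.pyRepeat ['.']
          (mx + 1 - (xs.foldl (fun st x => (st.1 ++ PySem.List.pyRepeat ['.'] (x - st.2) ++ ['*'], x + 1))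
              (acc, prev)).2)
    = acc ++ (List.range (mx + 1 - prev).toNat).map
        (fun (k : Nat) => if (prev + (k : Int)) ∈ xs then '*' else '.') := by
  intro xs
  induction xs with
  | nil =>
    intro acc prev _ _ _
    simp [PySem.List.pyRepeat_singleton, List.map_const']
  | cons x xs ih =>
    intro acc prev hpair hlo hhi
    have hx1 : prev ≤ x := hlo x (List.mem_cons_self)
    have hx2 : x ≤ mx := hhi x (List.mem_cons_self)
    have hgt : ∀ z ∈ xs, x < z := by
      intro z hz; exact (List.pairwise_cons.mp hpair).1 z hz
    simp only [List.foldl_cons]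
    rw [ih (acc ++ PySem.List.pyRepeat ['.'] (x - prev) ++ ['*']) (x + 1)
        (List.pairwise_cons.mp hpair).2
        (fun z hz => by have := hgt z hz; omega)
        (fun z hz => hhi z (List.mem_cons_of_mem _ hz))]
    have ha : (mx + 1 - prev).toNat = (x - prev).toNat + 1 + (mx - x).toNat := by omega
    rw [ha, List.range_add, List.map_append, List.range_succ, List.map_append]
    have h1 : (List.range (x - prev).toNat).map
        (fun (k : Nat) => if (prev + (k : Int)) ∈ x :: xs then '*' else '.')
        = (PySem.List.pyRepeat ['.'] (x - prev)) := by
      rw [List.map_congr_left (g := fun _ => '.') ?_]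
      · rw [List.map_const', List.length_range, PySem.List.pyRepeat_singleton]
      · intro k hk
        rw [List.mem_range] at hk
        have : (prev + (k : Int)) ∉ x :: xs := by
          rw [List.mem_cons]
          rintro (h | h)
          · omega
          · have := hgt _ h; omega
        simp [this]
    have h2 : [((x - prev).toNat : Nat)].map
        (fun (k : Nat) => if (prev + (k : Int)) ∈ x :: xs then '*' else '.') = ['*'] := by
      have hpx : prev + (((x - prev).toNat : Nat) : Int) = x := by omega
      rw [List.map_singleton, hpx]
      simp
    have h3 : ((List.range (mx - x).toNat).map (fun k => (x - prev).toNat + 1 + k)).map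
        (fun (k : Nat) => if (prev + (k : Int)) ∈ x :: xs then '*' else '.')
        = (List.range (mx - x).toNat).map
            (fun (k : Nat) => if (x + 1 + (k : Int)) ∈ xs then '*' else '.') := by
      rw [List.map_map]
      apply List.map_congr_left
      intro k _
      have he : prev + (((x - prev).toNat + 1 + k : Nat) : Int) = x + 1 + (k : Int) := by
        push_cast; omega
      simp only [Function.comp_apply, he, List.mem_cons]
      have : ¬ (x + 1 + (k : Int) = x) := by omega
      simp [this]
    rw [h1, h2, h3]
    have hmx : mx + 1 - (x + 1) = mx - x := by ring
    rw [hmx]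
    simp [List.append_assoc]

-- ===== VERDICT (by name: the statement is the Claim_ definition above) =====
theorem solution_spec : Claim_equal_solution := by
  intro line _ hpre
  have hne := pvPts_ne_nil line hpre
  have hnd : (pvPts line).Nodup := nodup_foldl_pvStepB _ _ (List.nodup_nil)
  show solution line = solution_alt line
  simp only [solution, solution_alt, foldA_components]
  rw [show List.foldl pvStepB PySem.Set.empty (PySem.List.combinations line 2) = pvPts line from rfl]
  rcases h1 : PySem.List.min? ((pvPts line).map Prod.fst) (fun v => v) with _ | mnx
  · rw [PySem.List.min?_eq_none_iff] at h1
  rcases h2 : PySem.List.max? ((pvPts line).map Prod.fst) (fun v => v) with _ | mxx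
  · rw [PySem.List.max?_eq_none_iff] at h2
  rcases h3 : PySem.List.min? ((pvPts line).map Prod.snd) (fun v => v) with _ | mny
  · rw [PySem.List.min?_eq_none_iff] at h3
  rcases h4 : PySem.List.max? ((pvPts line).map Prod.snd) (fun v => v) with _ | mxy
  · rw [PySem.List.max?_eq_none_iff] at h4
  have hb : ∀ p ∈ pvPts line, mnx ≤ p.1 ∧ p.1 ≤ mxx ∧ mny ≤ p.2 ∧ p.2 ≤ mxy := by
    intro p hp
    exact ⟨PySem.List.min?_isMin h1 p.1 (List.mem_map_of_mem hp),
           PySem.List.max?_isMax h2 p.1 (List.mem_map_of_mem hp),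
           PySem.List.min?_isMin h3 p.2 (List.mem_map_of_mem hp),
           PySem.List.max?_isMax h4 p.2 (List.mem_map_of_mem hp)⟩
  simp only [PySem.List.foldl_append_singleton_eq_map, List.nil_append]
  apply List.map_congr_left
  intro y _
  apply congrArg String.ofList
  -- B's row for y: sorted star columns of row y
  set xsy := PySem.List.sorted
      ((pvPts line).foldl (fun d p => d.modify p.2 [] (· ++ [p.1])) PySem.Dict.empty |>.getD y [])
      (fun v => v) false with hxsy
  have hmem : ∀ x : Int, x ∈ xsy ↔ (x, y) ∈ pvPts line := by
    intro x
    rw [hxsy, PySem.List.mem_sorted, getD_rows]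
    simp only [List.mem_map, List.mem_filter, beq_iff_eq]
    constructor
    · rintro ⟨q, ⟨⟨p, hp, rfl⟩, hq1⟩, rfl⟩
      simpa [Prod.swap, hq1.symm] using hp
    · intro hp
      exact ⟨(y, x), ⟨⟨(x, y), hp, rfl⟩, rfl⟩, rfl⟩
  have hndx : xsy.Nodup := by
    refine (PySem.List.sorted_perm _ _ _).nodup_iff.mpr ?_
    rw [getD_rows]
    apply List.Nodup.map_on
    · intro q1 hq1 q2 hq2 h
      rw [List.mem_filter, beq_iff_eq] at hq1 hq2
      exact Prod.ext (hq1.2.trans hq2.2.symm) h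
    · exact ((hnd.map (Prod.swap_injective)).filter _)
  have hpair : xsy.Pairwise (· < ·) := by
    have hle : xsy.Pairwise (fun a b => a ≤ b) := PySem.List.sorted_pairwise _ _
    exact (hle.and hndx).imp (fun h => lt_of_le_of_ne h.1 h.2)
  rw [rowFold mxx xsy [] mnx hpair
      (fun z hz => ((hb _ ((hmem z).mp hz)).1))
      (fun z hz => ((hb _ ((hmem z).mp hz)).2.1))]
  rw [PySem.List.pyRange_one, List.map_map, List.nil_append]
  apply List.map_congr_left
  intro k _
  simp only [Function.comp_apply]
  simp only [hmem]
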